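-- pv_equiv track=rewrite | github.com/dragana-u/AI | Lab_Minati_Godini/snake.py | SvrtiLevo
-- ===== SOURCE A (Python) =====
-- def SvrtiLevo(snake, green_apples, red_apples, orientation):
--     head = snake[-1]
--     if orientation == 'levo':
--         if head[1] - 1 >= 0 and (head[0], head[1] - 1) not in red_apples and (head[0], head[1] - 1) not in snake:
--             snake = list(snake)
--             snake.append((head[0], head[1] - 1))
--
--             if (head[0], head[1] - 1) in green_apples:
--                 green_apples = list(green_apples)
--                 green_apples = [x for x in green_apples if x not in snake]
--                 green_apples = tuple(green_apples)
--             else: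
--                 snake = snake[1:]
--             snake = tuple(snake)
--             orientation = 'dolu'
--     elif orientation == 'desno':
--         if head[1] + 1 < 10 and (head[0], head[1] + 1) not in red_apples and (head[0], head[1] + 1) not in snake:
--             snake = list(snake)
--             snake.append((head[0], head[1] + 1))
--
--             if (head[0], head[1] + 1) in green_apples:
--                 green_apples = list(green_apples)
--                 green_apples = [x for x in green_apples if x not in snake]
--                 green_apples = tuple(green_apples)
--             else:
--                 snake = snake[1:]
--             snake = tuple(snake)
--             orientation = 'gore'
--     elif orientation == 'dolu':
--         if head[0] + 1 < 10 and (head[0] + 1, head[1]) not in red_apples and (head[0] + 1, head[1]) not in snake: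
--             snake = list(snake)
--             snake.append((head[0] + 1, head[1]))
--
--             if (head[0] + 1, head[1]) in green_apples:
--                 green_apples = list(green_apples)
--                 green_apples = [x for x in green_apples if x not in snake]
--                 green_apples = tuple(green_apples)
--             else:
--                 snake = snake[1:]
--             snake = tuple(snake)
--             orientation = 'desno'
--     elif orientation == 'gore':
--         if head[0] - 1 >= 0 and (head[0] - 1, head[1]) not in red_apples and (head[0] - 1, head[1]) not in snake:
--             snake = list(snake)
--             snake.append((head[0] - 1, head[1]))
--
--             if (head[0] - 1, head[1]) in green_apples:
--                 green_apples = list(green_apples)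
--                 green_apples = [x for x in green_apples if x not in snake]
--                 green_apples = tuple(green_apples)
--             else:
--                 snake = snake[1:]
--             snake = tuple(snake)
--             orientation = 'levo'
--
--     return snake, green_apples, orientation
-- ===== SOURCE B (Python) =====
-- ROT_COUNT = {'dolu': 0, 'desno': 1, 'gore': 2, 'levo': 3}
--
-- def _rot(p):
--     return (p[1], 9 - p[0])
--
-- def _unrot(p):
--     return (9 - p[1], p[0])
--
-- def _power(f, k, p):
--     for _ in range(k):
--         p = f(p)
--     return p
--
-- def SvrtiLevo(snake, green_apples, red_apples, orientation):
--     # Canonicalize by symmetry: rotate the whole state k quarter-turns so the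
--     # move always becomes the single canonical "down" step, do that one step,
--     # then rotate the result back.
--     k = ROT_COUNT.get(orientation)
--     if k is None:
--         return snake, green_apples, orientation
--     s = [_power(_rot, k, p) for p in snake]
--     g = [_power(_rot, k, p) for p in green_apples]
--     r = [_power(_rot, k, p) for p in red_apples]
--     head = s[-1]
--     cell = (head[0] + 1, head[1])
--     if cell[0] >= 10 or cell in r or cell in s:
--         return snake, green_apples, orientation
--     s = s + [cell]
--     ate = cell in g
--     if ate:
--         g = [x for x in g if x not in s]
--     else:
--         s = s[1:]
--     new_or = ('desno', 'gore', 'levo', 'dolu')[k]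
--     snake2 = tuple(_power(_unrot, k, p) for p in s)
--     green2 = tuple(_power(_unrot, k, p) for p in g) if ate else green_apples
--     return snake2, green2, new_or
-- ===== Notes on version B (the rewrite author's own statement) =====
-- stated objective: alternative
-- what changed: B exploits the 4-fold rotational symmetry of the 10x10 grid: it rotates the whole state (snake, apples) k quarter-turns so that every orientation reduces to the single canonical 'move down' step, performs that one step, and rotates the result back, instead of A's four duplicated per-direction branches.
import Mathlib
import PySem

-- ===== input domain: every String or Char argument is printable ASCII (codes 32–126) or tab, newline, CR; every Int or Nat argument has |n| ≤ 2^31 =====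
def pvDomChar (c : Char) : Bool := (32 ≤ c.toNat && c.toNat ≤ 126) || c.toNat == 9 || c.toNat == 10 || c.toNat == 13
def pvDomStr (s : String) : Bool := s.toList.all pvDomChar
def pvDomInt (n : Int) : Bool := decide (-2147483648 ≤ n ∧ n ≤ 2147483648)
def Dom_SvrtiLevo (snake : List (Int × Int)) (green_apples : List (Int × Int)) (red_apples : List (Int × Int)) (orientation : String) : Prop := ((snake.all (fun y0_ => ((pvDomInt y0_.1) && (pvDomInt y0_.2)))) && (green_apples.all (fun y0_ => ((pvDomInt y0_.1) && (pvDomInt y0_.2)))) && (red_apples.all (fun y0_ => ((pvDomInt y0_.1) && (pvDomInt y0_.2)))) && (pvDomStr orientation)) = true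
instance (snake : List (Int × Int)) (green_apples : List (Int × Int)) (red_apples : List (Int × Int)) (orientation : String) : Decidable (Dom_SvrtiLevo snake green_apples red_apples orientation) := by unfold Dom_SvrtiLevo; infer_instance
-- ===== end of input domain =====

-- B re-implements the move by symmetry: rotate the whole state k quarter-turns so every orientation becomes the single canonical "down" step, do that one step, rotate back (objective: alternative).


-- ===== PORT A =====
-- literal transliteration of A; the 'none' arm of the head lookup is Python's
-- IndexError on an empty snake, excluded by Pre_SvrtiLevo.
def SvrtiLevo (snake : List (Int × Int)) (green_apples : List (Int × Int)) (red_apples : List (Int × Int)) (orientation : String) : (List (Int × Int)) × (List (Int × Int)) × String :=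
  match PySem.List.pyGet? snake (-1) with
  | none => ([], [], orientation)
  | some head =>
    if orientation = "levo" then
      if 0 ≤ head.2 - 1 ∧ (head.1, head.2 - 1) ∉ red_apples ∧ (head.1, head.2 - 1) ∉ snake then
        let s := snake ++ [(head.1, head.2 - 1)]
        if (head.1, head.2 - 1) ∈ green_apples then
          (s, green_apples.filter (fun x => decide (x ∉ s)), "dolu")
        else (s.drop 1, green_apples, "dolu")   -- snake[1:]
      else (snake, green_apples, orientation)
    else if orientation = "desno" then
      if head.2 + 1 < 10 ∧ (head.1, head.2 + 1) ∉ red_apples ∧ (head.1, head.2 + 1) ∉ snake then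
        let s := snake ++ [(head.1, head.2 + 1)]
        if (head.1, head.2 + 1) ∈ green_apples then
          (s, green_apples.filter (fun x => decide (x ∉ s)), "gore")
        else (s.drop 1, green_apples, "gore")
      else (snake, green_apples, orientation)
    else if orientation = "dolu" then
      if head.1 + 1 < 10 ∧ (head.1 + 1, head.2) ∉ red_apples ∧ (head.1 + 1, head.2) ∉ snake then
        let s := snake ++ [(head.1 + 1, head.2)]
        if (head.1 + 1, head.2) ∈ green_apples then
          (s, green_apples.filter (fun x => decide (x ∉ s)), "desno")
        else (s.drop 1, green_apples, "desno")
      else (snake, green_apples, orientation)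
    else if orientation = "gore" then
      if 0 ≤ head.1 - 1 ∧ (head.1 - 1, head.2) ∉ red_apples ∧ (head.1 - 1, head.2) ∉ snake then
        let s := snake ++ [(head.1 - 1, head.2)]
        if (head.1 - 1, head.2) ∈ green_apples then
          (s, green_apples.filter (fun x => decide (x ∉ s)), "levo")
        else (s.drop 1, green_apples, "levo")
      else (snake, green_apples, orientation)
    else (snake, green_apples, orientation)

-- ===== PORT B =====
-- Source B's quarter-turn of the 10×10 grid and its inverse
def pvRot (p : Int × Int) : Int × Int := (p.2, 9 - p.1)
def pvUnrot (p : Int × Int) : Int × Int := (9 - p.2, p.1)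
-- Source B's _power(f, k, p): apply f k times
def pvPow (f : Int × Int → Int × Int) : Nat → (Int × Int) → (Int × Int)
  | 0, p => p
  | k+1, p => pvPow f k (f p)
-- Source B's ROT_COUNT
def pvRotCount : PySem.Dict String Nat :=
  PySem.Dict.ofList [("dolu", 0), ("desno", 1), ("gore", 2), ("levo", 3)]

def SvrtiLevo_alt (snake : List (Int × Int)) (green_apples : List (Int × Int)) (red_apples : List (Int × Int)) (orientation : String) : (List (Int × Int)) × (List (Int × Int)) × String :=
  match pvRotCount.get? orientation with
  | none => (snake, green_apples, orientation)
  | some k =>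
    let s := snake.map (pvPow pvRot k)
    let g := green_apples.map (pvPow pvRot k)
    let r := red_apples.map (pvPow pvRot k)
    match PySem.List.pyGet? s (-1) with   -- head = s[-1]; none = IndexError in Source B, outside Pre_
    | none => ([], [], orientation)
    | some head =>
      if 10 ≤ head.1 + 1 ∨ (head.1 + 1, head.2) ∈ r ∨ (head.1 + 1, head.2) ∈ s then
        (snake, green_apples, orientation)
      else
        let s2 := s ++ [(head.1 + 1, head.2)]
        if (head.1 + 1, head.2) ∈ g then
          (s2.map (pvPow pvUnrot k),
           (g.filter (fun x => decide (x ∉ s2))).map (pvPow pvUnrot k),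
           ["desno", "gore", "levo", "dolu"].getD k "")   -- k ∈ 0..3, so getD never uses the default
        else
          ((s2.drop 1).map (pvPow pvUnrot k), green_apples,
           ["desno", "gore", "levo", "dolu"].getD k "")

-- ===== PRECONDITION & SPEC =====
-- Pre_ excludes only the empty snake, on which A raises IndexError at snake[-1].
def Pre_SvrtiLevo (snake : List (Int × Int)) (green_apples : List (Int × Int)) (red_apples : List (Int × Int)) (orientation : String) : Prop := snake ≠ []
instance (snake : List (Int × Int)) (green_apples : List (Int × Int)) (red_apples : List (Int × Int)) (orientation : String) : Decidable (Pre_SvrtiLevo snake green_apples red_apples orientation) := by unfold Pre_SvrtiLevo; infer_instance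
def pvWitness_SvrtiLevo : (List (Int × Int)) × (List (Int × Int)) × (List (Int × Int)) × String := ([(0, 0)], [(0, 1)], [], "desno")

def Spec_SvrtiLevo (snake : List (Int × Int)) (green_apples : List (Int × Int)) (red_apples : List (Int × Int)) (orientation : String) (out : (List (Int × Int)) × (List (Int × Int)) × String) : Prop := out = SvrtiLevo_alt snake green_apples red_apples orientation
instance (snake : List (Int × Int)) (green_apples : List (Int × Int)) (red_apples : List (Int × Int)) (orientation : String) (out : (List (Int × Int)) × (List (Int × Int)) × String) : Decidable (Spec_SvrtiLevo snake green_apples red_apples orientation out) := by unfold Spec_SvrtiLevo; infer_instance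

-- ===== CLAIM (what is proved, stated in full; the proofs are below) =====
def Claim_equal_SvrtiLevo : Prop := ∀ (snake : List (Int × Int)) (green_apples : List (Int × Int)) (red_apples : List (Int × Int)) (orientation : String), Dom_SvrtiLevo snake green_apples red_apples orientation → Pre_SvrtiLevo snake green_apples red_apples orientation → Spec_SvrtiLevo snake green_apples red_apples orientation (SvrtiLevo snake green_apples red_apples orientation)

-- ===== LEMMAS AND PROOFS =====
lemma pvRotCount_get (o : String) :
    pvRotCount.get? o =
      if o = "dolu" then some 0
      else if o = "desno" then some 1
      else if o = "gore" then some 2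
      else if o = "levo" then some 3
      else none := by
  simp only [pvRotCount, PySem.Dict.ofList, PySem.Dict.update, List.foldl,
    PySem.Dict.get?_insert, PySem.Dict.get?_empty]
  split_ifs <;> simp_all

-- one canonical "down" step on the rotated state equals A's direct branch
lemma pvStep (f finv : Int × Int → Int × Int) (hinv : ∀ p, finv (f p) = p)
    (snake ga ra : List (Int × Int)) (hd cell : Int × Int) (o no' : String)
    (hcell : (hd.1 + 1, hd.2) = f cell)
    (nb : Prop) [Decidable nb] (hb : nb ↔ hd.1 + 1 < 10) :
    (if 10 ≤ hd.1 + 1 ∨ (hd.1 + 1, hd.2) ∈ ra.map f ∨ (hd.1 + 1, hd.2) ∈ snake.map f then (snake, ga, o)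
     else if (hd.1 + 1, hd.2) ∈ ga.map f then
       ((snake.map f ++ [(hd.1 + 1, hd.2)]).map finv,
        ((ga.map f).filter (fun x => decide (x ∉ snake.map f ++ [(hd.1 + 1, hd.2)]))).map finv, no')
     else (((snake.map f ++ [(hd.1 + 1, hd.2)]).drop 1).map finv, ga, no'))
    =
    (if nb ∧ cell ∉ ra ∧ cell ∉ snake then
       if cell ∈ ga then (snake ++ [cell], ga.filter (fun x => decide (x ∉ snake ++ [cell])), no')
       else ((snake ++ [cell]).drop 1, ga, no')
     else (snake, ga, o)) := by
  have hinj : Function.Injective f := Function.LeftInverse.injective hinv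
  have hmr : (f cell ∈ ra.map f) ↔ cell ∈ ra := List.mem_map_of_injective hinj
  have hms : (f cell ∈ snake.map f) ↔ cell ∈ snake := List.mem_map_of_injective hinj
  have hmg : (f cell ∈ ga.map f) ↔ cell ∈ ga := List.mem_map_of_injective hinj
  have hsm : snake.map f ++ [f cell] = (snake ++ [cell]).map f := by simp
  have hid : ∀ l : List (Int × Int), (l.map f).map finv = l := by
    intro l; rw [List.map_map]; simp [Function.comp_def, hinv]
  rw [hcell]
  by_cases h1 : nb ∧ cell ∉ ra ∧ cell ∉ snake
  · rw [if_pos h1, if_neg (by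
      push_neg
      refine ⟨by have := hb.mp h1.1; omega, hmr.not.mpr h1.2.1, hms.not.mpr h1.2.2⟩)]
    rw [hsm]
    by_cases hg : cell ∈ ga
    · rw [if_pos (hmg.mpr hg), if_pos hg, hid]
      have hfil : ((ga.map f).filter (fun x => decide (x ∉ (snake ++ [cell]).map f)))
          = (ga.filter (fun x => decide (x ∉ snake ++ [cell]))).map f := by
        rw [List.filter_map]
        congr 1
        apply List.filter_congr
        intro x _
        simp [Function.comp, List.mem_map_of_injective hinj, hinj.eq_iff]
      rw [hfil, hid]
    · rw [if_neg (hmg.not.mpr hg), if_neg hg, ← List.map_drop, hid]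
  · rw [if_neg h1, if_pos ?_]
    by_contra hc
    push_neg at hc
    have hlt : hd.1 + 1 < 10 := hc.1
    exact h1 ⟨hb.mpr hlt, hmr.not.mp hc.2.1, hms.not.mp hc.2.2⟩

-- ===== VERDICT (by name: the statement is the Claim_ definition above) =====
theorem SvrtiLevo_spec : Claim_equal_SvrtiLevo := by
  intro snake ga ra o _ hpre
  unfold Spec_SvrtiLevo
  obtain ⟨head, hh⟩ : ∃ h, snake.getLast? = some h := by
    cases hsk : snake.getLast? with
    | none => exact absurd (List.getLast?_eq_none_iff.mp hsk) hpre
    | some h => exact ⟨h, rfl⟩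
  obtain ⟨h1, h2⟩ := head
  by_cases c1 : o = "levo"
  · subst c1
    simp only [SvrtiLevo, SvrtiLevo_alt, pvRotCount_get, PySem.List.pyGet?_neg_one,
      List.getLast?_map, hh, Option.map_some, String.reduceEq, reduceIte]
    rw [show List.getD ["desno", "gore", "levo", "dolu"] 3 "" = "dolu" from rfl,
      pvStep (pvPow pvRot 3) (pvPow pvUnrot 3)
        (by intro p; simp [pvPow, pvRot, pvUnrot])
        snake ga ra (pvPow pvRot 3 (h1, h2)) (h1, h2 - 1) "levo" "dolu"
        (by simp [pvPow, pvRot]; omega) (0 ≤ h2 - 1)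
        (by simp [pvPow, pvRot]; omega)]
  · by_cases c2 : o = "desno"
    · subst c2
      simp only [SvrtiLevo, SvrtiLevo_alt, pvRotCount_get, PySem.List.pyGet?_neg_one,
        List.getLast?_map, hh, Option.map_some, String.reduceEq, reduceIte]
      rw [show List.getD ["desno", "gore", "levo", "dolu"] 1 "" = "gore" from rfl,
        pvStep (pvPow pvRot 1) (pvPow pvUnrot 1)
          (by intro p; simp [pvPow, pvRot, pvUnrot])
          snake ga ra (pvPow pvRot 1 (h1, h2)) (h1, h2 + 1) "desno" "gore"
          (by simp [pvPow, pvRot]) (h2 + 1 < 10)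
          (by simp [pvPow, pvRot])]
    · by_cases c3 : o = "dolu"
      · subst c3
        simp only [SvrtiLevo, SvrtiLevo_alt, pvRotCount_get, PySem.List.pyGet?_neg_one,
          List.getLast?_map, hh, Option.map_some, String.reduceEq, reduceIte]
        rw [show List.getD ["desno", "gore", "levo", "dolu"] 0 "" = "desno" from rfl,
          pvStep (pvPow pvRot 0) (pvPow pvUnrot 0)
            (by intro p; simp [pvPow])
            snake ga ra (pvPow pvRot 0 (h1, h2)) (h1 + 1, h2) "dolu" "desno"
            (by simp [pvPow]) (h1 + 1 < 10)
            (by simp [pvPow])]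
      · by_cases c4 : o = "gore"
        · subst c4
          simp only [SvrtiLevo, SvrtiLevo_alt, pvRotCount_get, PySem.List.pyGet?_neg_one,
            List.getLast?_map, hh, Option.map_some, String.reduceEq, reduceIte]
          rw [show List.getD ["desno", "gore", "levo", "dolu"] 2 "" = "levo" from rfl,
            pvStep (pvPow pvRot 2) (pvPow pvUnrot 2)
              (by intro p; simp [pvPow, pvRot, pvUnrot])
              snake ga ra (pvPow pvRot 2 (h1, h2)) (h1 - 1, h2) "gore" "levo"
              (by simp [pvPow, pvRot]; omega) (0 ≤ h1 - 1)
              (by simp [pvPow, pvRot]; omega)]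
        · simp only [SvrtiLevo, SvrtiLevo_alt, pvRotCount_get, PySem.List.pyGet?_neg_one,
            hh, if_neg c1, if_neg c2, if_neg c3, if_neg c4]
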